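-- pv_equiv track=rewrite | github.com/Santh0shKr1shna/advent-of-code | 2025/Day06/main.py | part_two
-- ===== SOURCE A (Python) =====
-- def mul(l):
--     res = 1
--     for i in l: res *= i
--     return res
--
-- def part_two(inputs: list):
--     res = 0
--
--     rows, cols = len(inputs), len(inputs[0])
--
--     run = []
--     for j in range(cols-1, -1, -1):
--         t = ""
--         for i in range(rows):
--             c = inputs[i][j]
--             if i == rows-1 and c in "+*":
--                 if c == "+":
--                     res += sum(run)
--                 else:
--                     res += mul(run)
--                 run.clear()
--
--             t += c if c != " " else ""
--
--             if i == rows-2: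
--                 if not t: continue
--                 run.append(int(t))
--
--     return res
-- ===== SOURCE B (Python) =====
-- def part_two(inputs: list):
--     # Single left-to-right pass with a scalar accumulator per operator group
--     # (no run list, no reversed scan).
--     rows, cols = len(inputs), len(inputs[0])
--     res = 0
--     cur_op = None
--     acc = 0
--     for j in range(cols):
--         digits = "".join(inputs[i][j] for i in range(rows - 1) if inputs[i][j] != " ")
--         num = int(digits) if digits else None
--         c = inputs[rows - 1][j]
--         if c == "+" or c == "*":
--             if cur_op is not None:
--                 res += acc
--             cur_op = c
--             acc = 0 if c == "+" else 1
--         if num is not None and cur_op is not None: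
--             acc = acc + num if cur_op == "+" else acc * num
--     if cur_op is not None:
--         res += acc
--     return res
-- ===== Notes on version B (the rewrite author's own statement) =====
-- stated objective: alternative
-- what changed: A scans columns right-to-left keeping a list of pending numbers that is summed/multiplied when an operator column closes a group; B makes a single left-to-right pass keeping only (current operator, scalar accumulator) per group, so the pending-number list disappears.
import Mathlib
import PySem

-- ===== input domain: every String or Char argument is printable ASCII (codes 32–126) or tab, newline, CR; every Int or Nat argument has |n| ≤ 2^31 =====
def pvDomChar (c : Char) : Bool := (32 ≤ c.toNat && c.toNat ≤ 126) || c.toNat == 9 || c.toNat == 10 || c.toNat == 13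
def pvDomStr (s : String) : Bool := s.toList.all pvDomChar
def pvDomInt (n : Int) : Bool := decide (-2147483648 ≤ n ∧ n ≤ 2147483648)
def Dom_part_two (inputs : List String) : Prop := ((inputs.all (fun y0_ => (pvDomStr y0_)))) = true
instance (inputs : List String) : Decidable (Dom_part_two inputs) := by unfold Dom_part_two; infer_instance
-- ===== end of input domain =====

-- B replaces A's reversed scan carrying a list of pending numbers by a single left-to-right
-- pass that keeps one scalar accumulator per operator group (objective: simpler/alternative).

-- ===== PORT A =====
def pyMul (l : List Int) : Int := l.foldl (fun res i => res * i) 1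

def part_two (inputs : List String) : Int :=
  let rows : Int := (inputs.length : Int)
  let cols : Int := ((((PySem.List.pyGet? inputs 0).getD "").toList.length : Nat) : Int)
  (((PySem.List.pyRange (cols - 1) (-1) (-1)).foldl (fun (s : Int × List Int) (j : Int) =>
      let r := (PySem.List.pyRange 0 rows 1).foldl (fun (st : Int × List Int × List Char) (i : Int) =>
        let c : Char := (PySem.Str.pyGet? ((PySem.List.pyGet? inputs i).getD "") j).getD ' '
        let rr : Int × List Int :=
          if i = rows - 1 ∧ (c = '+' ∨ c = '*') then
            if c = '+' then (st.1 + st.2.1.sum, []) else (st.1 + pyMul st.2.1, [])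
          else (st.1, st.2.1)
        let t2 : List Char := if c ≠ ' ' then st.2.2 ++ [c] else st.2.2
        let run2 : List Int :=
          if i = rows - 2 then
            (if t2 = [] then rr.2 else rr.2 ++ [(PySem.Int.ofChars? t2).getD 0])
          else rr.2
        (rr.1, run2, t2)) (s.1, s.2, ([] : List Char))
      (r.1, r.2.1)) ((0 : Int), ([] : List Int))).1)

-- ===== PORT B =====
def part_two_alt (inputs : List String) : Int :=
  let rows : Int := (inputs.length : Int)
  let cols : Int := ((((PySem.List.pyGet? inputs 0).getD "").toList.length : Nat) : Int)
  let r := (PySem.List.pyRange 0 cols 1).foldl (fun (s : Int × Option Char × Int) (j : Int) =>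
    let digits : List Char := (PySem.List.pyRange 0 (rows - 1) 1).filterMap (fun i =>
      let c := (PySem.Str.pyGet? ((PySem.List.pyGet? inputs i).getD "") j).getD ' '
      if c ≠ ' ' then some c else none)
    let num : Option Int := if digits ≠ [] then some ((PySem.Int.ofChars? digits).getD 0) else none
    let c : Char := (PySem.Str.pyGet? ((PySem.List.pyGet? inputs (rows - 1)).getD "") j).getD ' '
    let s1 : Int × Option Char × Int :=
      if c = '+' ∨ c = '*' then
        ((if s.2.1.isSome then s.1 + s.2.2 else s.1), some c, if c = '+' then (0 : Int) else 1)
      else s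
    let acc2 : Int :=
      match num, s1.2.1 with
      | some nval, some o => if o = '+' then s1.2.2 + nval else s1.2.2 * nval
      | _, _ => s1.2.2
    (s1.1, s1.2.1, acc2)) ((0 : Int), (none : Option Char), (0 : Int))
  if r.2.1.isSome then r.1 + r.2.2 else r.1

-- ===== PRECONDITION & SPEC =====
-- non-space characters of rows 0..rows-2 in column j, top to bottom
def colChars (inputs : List String) (j : Nat) : List Char :=
  (List.range (inputs.length - 1)).filterMap (fun i =>
    let c := ((inputs.getD i "").toList.getD j ' ')
    if c ≠ ' ' then some c else none)

-- Pre_ excludes exactly the inputs where A raises: the empty list (IndexError on inputs[0]),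
-- a row shorter than the first row (IndexError on inputs[i][j]), and a column whose joined
-- non-space characters (last row excluded) are not a valid int literal (ValueError on int(t)).
def Pre_part_two (inputs : List String) : Prop :=
  inputs ≠ [] ∧
  (∀ s ∈ inputs, (inputs.headD "").toList.length ≤ s.toList.length) ∧
  (∀ j < (inputs.headD "").toList.length,
    colChars inputs j ≠ [] → (PySem.Int.ofChars? (colChars inputs j)).isSome = true)

instance (inputs : List String) : Decidable (Pre_part_two inputs) := by
  unfold Pre_part_two; infer_instance

def pvWitness_part_two : List String := ["12", "+ "]

def Spec_part_two (inputs : List String) (out : Int) : Prop := out = part_two_alt inputs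
instance (inputs : List String) (out : Int) : Decidable (Spec_part_two inputs out) := by unfold Spec_part_two; infer_instance

-- ===== CLAIM (what is proved, stated in full; the proofs are below) =====
def Claim_equal_part_two : Prop := ∀ (inputs : List String), Dom_part_two inputs → Pre_part_two inputs → Spec_part_two inputs (part_two inputs)

-- ===== LEMMAS AND PROOFS =====

-- character of row i, column j (space when out of range; within Pre_ it is the real character)
def charAt (inputs : List String) (i j : Nat) : Char :=
  ((inputs.getD i "").toList.getD j ' ')

def botAt (inputs : List String) (j : Nat) : Char := charAt inputs (inputs.length - 1) j

def numAt (inputs : List String) (j : Nat) : Option Int :=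
  if colChars inputs j ≠ [] then some ((PySem.Int.ofChars? (colChars inputs j)).getD 0) else none

def parsedCols (inputs : List String) : List (Option Int × Char) :=
  (List.range ((inputs.headD "").toList.length)).map (fun j => (numAt inputs j, botAt inputs j))

-- net effect of A's inner row loop on one column, on the (res, run) aggregation state
def colStepA (s : Int × List Int) (x : Option Int × Char) : Int × List Int :=
  let run1 := s.2 ++ x.1.toList
  if x.2 = '+' then (s.1 + run1.sum, [])
  else if x.2 = '*' then (s.1 + pyMul run1, [])
  else (s.1, run1)

-- net effect of B's body on one column, on the (res, current op, accumulator) state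
def stepB (s : Int × Option Char × Int) (x : Option Int × Char) : Int × Option Char × Int :=
  let s1 : Int × Option Char × Int :=
    if x.2 = '+' ∨ x.2 = '*' then
      ((if s.2.1.isSome then s.1 + s.2.2 else s.1), some x.2, if x.2 = '+' then (0 : Int) else 1)
    else s
  let acc2 : Int :=
    match x.1, s1.2.1 with
    | some nval, some o => if o = '+' then s1.2.2 + nval else s1.2.2 * nval
    | _, _ => s1.2.2
  (s1.1, s1.2.1, acc2)

-- value B's open group (cur, acc) contributes once the numbers 'run' still to its right are absorbed
def closeG (cur : Option Char) (acc : Int) (run : List Int) : Int :=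
  match cur with
  | none => 0
  | some o => if o = '+' then acc + run.sum else acc * pyMul run

theorem pyMul_append (l : List Int) (n : Int) : pyMul (l ++ [n]) = pyMul l * n := by
  simp [pyMul]

theorem charAt_eq (inputs : List String) (i j : Nat) :
    (PySem.Str.pyGet? ((PySem.List.pyGet? inputs (i : Int)).getD "") (j : Int)).getD ' '
      = charAt inputs i j := by
  simp [charAt, PySem.List.pyGet?_natCast, List.getD_eq_getElem?_getD]

theorem hcols (inputs : List String) :
    ((((PySem.List.pyGet? inputs 0).getD "").toList.length : Nat) : Int)
      = (((inputs.headD "").toList.length : Nat) : Int) := by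
  cases inputs <;> simp [PySem.List.pyGet?, PySem.List.pyIdx?]

theorem rev_range_map (m : Nat) : (List.range m).reverse = (List.range m).map (fun k => m - 1 - k) := by
  apply List.ext_getElem
  · simp
  · intro i h1 h2
    simp only [List.getElem_reverse, List.getElem_map, List.getElem_range, List.length_range] at h1 h2 ⊢
    try omega

theorem revRange (m : Nat) :
    PySem.List.pyRange ((m : Int) - 1) (-1) (-1) = ((List.range m).reverse).map (Nat.cast : Nat → Int) := by
  cases m with
  | zero => simp [PySem.List.pyRange]
  | succ k =>
    rw [rev_range_map, List.map_map]
    unfold PySem.List.pyRange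
    have h1 : ¬ ((-1 : Int) = 0) := by norm_num
    have h2 : ¬ ((0 : Int) < -1) := by norm_num
    have h3 : (-1 : Int) < ((k + 1 : Nat) : Int) - 1 := by push_cast; omega
    simp only [h1, if_false, h2, h3, if_true]
    have h4 : ((((k + 1 : Nat) : Int) - 1 - (-1) + -(-1) - 1) / -(-1)).toNat = k + 1 := by push_cast; omega
    rw [h4]
    apply List.map_congr_left
    intro i hi
    simp only [List.mem_range] at hi
    simp only [Function.comp]
    push_cast
    omega

-- A's inner row loop, written over Nat row indices and charAt
def bodyN (inputs : List String) (j : Nat) (st : Int × List Int × List Char) (i : Nat) :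
    Int × List Int × List Char :=
  let c : Char := charAt inputs i j
  let rr : Int × List Int :=
    if (i : Int) = (inputs.length : Int) - 1 ∧ (c = '+' ∨ c = '*') then
      if c = '+' then (st.1 + st.2.1.sum, []) else (st.1 + pyMul st.2.1, [])
    else (st.1, st.2.1)
  let t2 : List Char := if c ≠ ' ' then st.2.2 ++ [c] else st.2.2
  let run2 : List Int :=
    if (i : Int) = (inputs.length : Int) - 2 then
      (if t2 = [] then rr.2 else rr.2 ++ [(PySem.Int.ofChars? t2).getD 0])
    else rr.2
  (rr.1, run2, t2)

theorem phase1 (inputs : List String) (j : Nat) (l : List Nat)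
    (hl : ∀ i ∈ l, ((i : Int) ≠ (inputs.length : Int) - 1 ∧ (i : Int) ≠ (inputs.length : Int) - 2)) :
    ∀ (res : Int) (run : List Int) (t : List Char),
    l.foldl (bodyN inputs j) (res, run, t)
      = (res, run, t ++ l.filterMap (fun i =>
          if charAt inputs i j ≠ ' ' then some (charAt inputs i j) else none)) := by
  induction l with
  | nil => intro res run t; simp
  | cons i l' ih =>
    intro res run t
    obtain ⟨hi1, hi2⟩ := hl i (by simp)
    simp only [List.foldl_cons, List.filterMap_cons]
    have hstep : bodyN inputs j (res, run, t) i
        = (res, run, if charAt inputs i j ≠ ' ' then t ++ [charAt inputs i j] else t) := by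
      simp [bodyN, hi1, hi2]
    rw [hstep, ih (fun i hi => hl i (by simp [hi]))]
    by_cases hc : charAt inputs i j = ' ' <;> simp [hc]

theorem innerA (inputs : List String) (j : Nat) (s : Int × List Int) :
    (let r := (PySem.List.pyRange 0 (inputs.length : Int) 1).foldl
        (fun (st : Int × List Int × List Char) (i : Int) =>
          let c : Char := (PySem.Str.pyGet? ((PySem.List.pyGet? inputs i).getD "") (j : Int)).getD ' '
          let rr : Int × List Int :=
            if i = (inputs.length : Int) - 1 ∧ (c = '+' ∨ c = '*') then
              if c = '+' then (st.1 + st.2.1.sum, []) else (st.1 + pyMul st.2.1, [])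
            else (st.1, st.2.1)
          let t2 : List Char := if c ≠ ' ' then st.2.2 ++ [c] else st.2.2
          let run2 : List Int :=
            if i = (inputs.length : Int) - 2 then
              (if t2 = [] then rr.2 else rr.2 ++ [(PySem.Int.ofChars? t2).getD 0])
            else rr.2
          (rr.1, run2, t2)) (s.1, s.2, ([] : List Char))
     (r.1, r.2.1)) = colStepA s (numAt inputs j, botAt inputs j) := by
  rw [PySem.List.pyRange_zero_natCast, List.foldl_map]
  have hb : (fun (st : Int × List Int × List Char) (i : Nat) =>
      (fun (st : Int × List Int × List Char) (i : Int) =>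
        let c : Char := (PySem.Str.pyGet? ((PySem.List.pyGet? inputs i).getD "") (j : Int)).getD ' '
        let rr : Int × List Int :=
          if i = (inputs.length : Int) - 1 ∧ (c = '+' ∨ c = '*') then
            if c = '+' then (st.1 + st.2.1.sum, []) else (st.1 + pyMul st.2.1, [])
          else (st.1, st.2.1)
        let t2 : List Char := if c ≠ ' ' then st.2.2 ++ [c] else st.2.2
        let run2 : List Int :=
          if i = (inputs.length : Int) - 2 then
            (if t2 = [] then rr.2 else rr.2 ++ [(PySem.Int.ofChars? t2).getD 0])
          else rr.2
        (rr.1, run2, t2)) st (i : Int)) = bodyN inputs j := by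
    funext st i
    simp only [bodyN, charAt_eq]
  rw [hb]
  cases hn : inputs.length with
  | zero =>
    have hnil : inputs = [] := List.length_eq_zero_iff.mp hn
    subst hnil
    simp [colStepA, numAt, colChars, botAt, charAt]
  | succ k =>
    cases k with
    | zero =>
      have hnum : numAt inputs j = none := by simp [numAt, colChars, hn]
      have hbot : botAt inputs j = charAt inputs 0 j := by simp [botAt, hn]
      have e1 : (0 : Int) = (inputs.length : Int) - 1 := by omega
      have e2 : (0 : Int) ≠ (inputs.length : Int) - 2 := by omega
      by_cases hp : charAt inputs 0 j = '+'
      · simp [bodyN, colStepA, hnum, hbot, hp, e1]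
      · by_cases hm : charAt inputs 0 j = '*'
        · simp [bodyN, colStepA, hnum, hbot, hm, e1]
        · simp [bodyN, colStepA, hnum, hbot, hp, hm, e1]
    | succ k2 =>
      have c1 : ((k2 : Nat) : Int) ≠ (inputs.length : Int) - 1 := by omega
      have c2 : ((k2 : Nat) : Int) = (inputs.length : Int) - 2 := by omega
      have c3 : ((k2 + 1 : Nat) : Int) = (inputs.length : Int) - 1 := by omega
      have c4 : ((k2 + 1 : Nat) : Int) ≠ (inputs.length : Int) - 2 := by omega
      have hbot : botAt inputs j = charAt inputs (k2 + 1) j := by simp [botAt, hn]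
      have hcol : colChars inputs j = (List.range (k2 + 1)).filterMap (fun i =>
          if charAt inputs i j ≠ ' ' then some (charAt inputs i j) else none) := by
        simp [colChars, charAt, hn]
      rw [List.range_succ, List.range_succ, List.foldl_append, List.foldl_append]
      rw [phase1 inputs j (List.range k2)
        (fun i hi => by simp only [List.mem_range] at hi; exact ⟨by omega, by omega⟩)]
      simp only [List.foldl_cons, List.foldl_nil, List.nil_append]
      have ht2 : (if charAt inputs k2 j ≠ ' '
            then ((List.range k2).filterMap (fun i =>
                if charAt inputs i j ≠ ' ' then some (charAt inputs i j) else none)) ++ [charAt inputs k2 j]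
            else (List.range k2).filterMap (fun i =>
                if charAt inputs i j ≠ ' ' then some (charAt inputs i j) else none))
          = colChars inputs j := by
        rw [hcol, List.range_succ, List.filterMap_append]
        by_cases hc : charAt inputs k2 j = ' ' <;> simp [hc]
      have hstep1 : bodyN inputs j (s.1, s.2, (List.range k2).filterMap (fun i =>
            if charAt inputs i j ≠ ' ' then some (charAt inputs i j) else none)) k2
          = (s.1, s.2 ++ (numAt inputs j).toList, colChars inputs j) := by
        have d1 : ¬(((k2 : Nat) : Int) = (inputs.length : Int) - 1
            ∧ (charAt inputs k2 j = '+' ∨ charAt inputs k2 j = '*')) := fun h => c1 h.1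
        simp only [bodyN, if_neg d1, if_pos c2]
        rw [ht2]
        by_cases hnil : colChars inputs j = [] <;> simp [numAt, hnil]
      rw [hstep1]
      by_cases hp : charAt inputs (k2 + 1) j = '+'
      · simp [bodyN, colStepA, hbot, hp, c3]
      · by_cases hm : charAt inputs (k2 + 1) j = '*'
        · simp [bodyN, colStepA, hbot, hm, c3]
        · simp [bodyN, colStepA, hbot, hp, hm, c3]

theorem portA_eq (inputs : List String) :
    part_two inputs = ((parsedCols inputs).foldr (fun x s => colStepA s x) (0, [])).1 := by
  simp only [part_two]
  rw [hcols inputs, revRange, List.foldl_map]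
  simp only [innerA]
  rw [List.foldl_reverse]
  simp only [parsedCols, List.foldr_map]

theorem digits_eq (inputs : List String) (j : Nat) :
    (PySem.List.pyRange 0 ((inputs.length : Int) - 1) 1).filterMap (fun i =>
      let c := (PySem.Str.pyGet? ((PySem.List.pyGet? inputs i).getD "") (j : Int)).getD ' '
      if c ≠ ' ' then some c else none) = colChars inputs j := by
  cases hn : inputs.length with
  | zero =>
    have hnil : inputs = [] := List.length_eq_zero_iff.mp hn
    subst hnil
    norm_num [PySem.List.pyRange, colChars]
  | succ k =>
    have h : (((k + 1 : Nat) : Int) - 1) = ((k : Nat) : Int) := by push_cast; ring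
    rw [h, PySem.List.pyRange_zero_natCast, List.filterMap_map]
    have h2 : inputs.length - 1 = k := by omega
    simp only [colChars, h2]
    congr 1
    funext i
    simp [Function.comp]

theorem bot_eq (inputs : List String) (j : Nat) :
    (PySem.Str.pyGet? ((PySem.List.pyGet? inputs ((inputs.length : Int) - 1)).getD "") (j : Int)).getD ' '
      = botAt inputs j := by
  cases hn : inputs.length with
  | zero =>
    have hnil : inputs = [] := List.length_eq_zero_iff.mp hn
    subst hnil
    simp [botAt, charAt, PySem.List.pyGet?, PySem.List.pyIdx?]
  | succ k =>
    have h : (((k + 1 : Nat) : Int) - 1) = ((k : Nat) : Int) := by push_cast; ring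
    rw [h, charAt_eq]
    simp [botAt, hn]

theorem portB_eq (inputs : List String) :
    part_two_alt inputs =
      (let r := (parsedCols inputs).foldl stepB (0, none, 0);
       if r.2.1.isSome then r.1 + r.2.2 else r.1) := by
  simp only [part_two_alt]
  rw [hcols inputs, PySem.List.pyRange_zero_natCast, List.foldl_map]
  simp only [digits_eq, bot_eq, parsedCols, List.foldl_map]
  rw [PySem.List.foldl_congr_mem _ _
    (fun (s : Int × Option Char × Int) (jn : Nat) => stepB s (numAt inputs jn, botAt inputs jn)) _
    (by intro acc x hx; simp [stepB, numAt])]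

theorem core_lemma (ps : List (Option Int × Char)) : ∀ (res : Int) (cur : Option Char) (acc : Int),
    (let r := ps.foldl stepB (res, cur, acc); if r.2.1.isSome then r.1 + r.2.2 else r.1)
    = res + (ps.foldr (fun x s => colStepA s x) (0, [])).1
        + closeG cur acc (ps.foldr (fun x s => colStepA s x) (0, [])).2 := by
  induction ps with
  | nil =>
    intro res cur acc
    cases cur with
    | none => simp [closeG]
    | some o =>
      by_cases ho : o = '+' <;> simp [closeG, ho, pyMul]
  | cons x l ih =>
    intro res cur acc
    obtain ⟨num, c⟩ := x
    simp only [List.foldl_cons, List.foldr_cons]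
    rw [ih]
    by_cases hc : c = '+' ∨ c = '*'
    · rcases hc with hc | hc <;> subst hc <;> cases num <;> cases cur <;>
        · simp only [stepB, colStepA, closeG]
          simp [pyMul]
          try ring
    · have h1 : ¬ c = '+' := fun h => hc (Or.inl h)
      have h2 : ¬ c = '*' := fun h => hc (Or.inr h)
      cases num with
      | none =>
        cases cur <;> simp [stepB, colStepA, closeG, h1, h2]
      | some n =>
        cases cur with
        | none => simp [stepB, colStepA, closeG, h1, h2]
        | some o =>
          by_cases ho : o = '+' <;>
            simp [stepB, colStepA, closeG, h1, h2, ho, pyMul_append] <;> ring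

-- ===== VERDICT (by name: the statement is the Claim_ definition above) =====
theorem part_two_spec : Claim_equal_part_two := by
  intro inputs _ _
  unfold Spec_part_two
  rw [portA_eq inputs, portB_eq inputs, core_lemma]
  simp [closeG]
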